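-- pv_equiv track=rewrite | github.com/Optimus266/calendrier | affiche11piece.py | get_hex_coordinates
-- ===== SOURCE A (Python) =====
-- def get_hex_coordinates(radius):
--     coordinates = []
--     for q in range(-radius, radius + 1):
--         r1 = max(-radius, -q - radius)
--         r2 = min(radius, -q + radius)
--         for r in range(r1, r2 + 1):
--             coordinates.append((q, r))
--     return coordinates
-- ===== SOURCE B (Python) =====
-- def get_hex_coordinates(radius):
--     rng = range(-radius, radius + 1)
--     return [(q, r) for q in rng for r in rng if abs(q + r) <= radius]
-- ===== Notes on version B (the rewrite author's own statement) =====
-- stated objective: simpler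
-- what changed: Replaces A's accumulator loop with per-q computed interval bounds r1/r2 by a single flat comprehension over the full square of (q,r) pairs filtered by the third-hex-coordinate constraint |q+r| <= radius.
import Mathlib
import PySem

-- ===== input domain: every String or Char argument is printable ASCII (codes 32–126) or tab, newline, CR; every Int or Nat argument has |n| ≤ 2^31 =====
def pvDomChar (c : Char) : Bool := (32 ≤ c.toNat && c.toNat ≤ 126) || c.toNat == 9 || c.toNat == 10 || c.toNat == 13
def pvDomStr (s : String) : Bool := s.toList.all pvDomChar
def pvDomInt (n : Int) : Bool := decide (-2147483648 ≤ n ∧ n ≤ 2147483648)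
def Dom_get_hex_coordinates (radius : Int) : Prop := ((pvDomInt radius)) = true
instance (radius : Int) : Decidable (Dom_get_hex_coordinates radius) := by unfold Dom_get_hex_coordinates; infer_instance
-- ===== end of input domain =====

-- B replaces A's accumulator loop with computed per-q interval bounds by one flat
-- comprehension over the square of (q,r) pairs filtered by |q+r| <= radius (simpler; same output).

-- ===== PORT A =====
def get_hex_coordinates (radius : Int) : List (Int × Int) :=
  (PySem.List.pyRange (-radius) (radius + 1) 1).foldl (fun coordinates q =>
    let r1 := max (-radius) (-q - radius)
    let r2 := min radius (-q + radius)
    (PySem.List.pyRange r1 (r2 + 1) 1).foldl (fun cs r => cs ++ [(q, r)]) coordinates) []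

-- ===== PORT B =====
def get_hex_coordinates_alt (radius : Int) : List (Int × Int) :=
  let rng := PySem.List.pyRange (-radius) (radius + 1) 1
  rng.flatMap (fun q =>
    (rng.filter (fun r => decide (|q + r| ≤ radius))).map (fun r => (q, r)))

-- ===== PRECONDITION & SPEC =====
def Spec_get_hex_coordinates (radius : Int) (out : List (Int × Int)) : Prop := out = get_hex_coordinates_alt radius
instance (radius : Int) (out : List (Int × Int)) : Decidable (Spec_get_hex_coordinates radius out) := by unfold Spec_get_hex_coordinates; infer_instance

-- ===== CLAIM (what is proved, stated in full; the proofs are below) =====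
def Claim_equal_get_hex_coordinates : Prop := ∀ (radius : Int), Dom_get_hex_coordinates radius → Spec_get_hex_coordinates radius (get_hex_coordinates radius)

-- ===== LEMMAS AND PROOFS =====

-- For q within the outer range, B's filtered full r-range is exactly A's interval [r1, r2].
theorem pv_range_filter_eq (radius q : Int) (hq : -radius ≤ q) (hq' : q < radius + 1) :
    (PySem.List.pyRange (-radius) (radius + 1) 1).filter (fun r => decide (|q + r| ≤ radius))
      = PySem.List.pyRange (max (-radius) (-q - radius)) (min radius (-q + radius) + 1) 1 := by
  set r1 := max (-radius) (-q - radius) with hr1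
  set r2 := min radius (-q + radius) with hr2
  have h1 : -radius ≤ r1 := le_max_left _ _
  have h2 : r1 ≤ r2 + 1 := by simp only [hr1, hr2]; omega
  have h3 : r2 + 1 ≤ radius + 1 := by simp only [hr2]; omega
  rw [PySem.List.pyRange_one_append (-radius) r1 (radius + 1) h1 (le_trans h2 h3),
      PySem.List.pyRange_one_append r1 (r2 + 1) (radius + 1) h2 h3]
  rw [List.filter_append, List.filter_append]
  have hl : (PySem.List.pyRange (-radius) r1 1).filter (fun r => decide (|q + r| ≤ radius)) = [] := by
    rw [List.filter_eq_nil_iff]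
    intro r hr
    rw [PySem.List.mem_pyRange_one] at hr
    simp only [hr1] at hr
    simp only [decide_eq_true_eq, abs_le]
    omega
  have hm : (PySem.List.pyRange r1 (r2 + 1) 1).filter (fun r => decide (|q + r| ≤ radius))
      = PySem.List.pyRange r1 (r2 + 1) 1 := by
    rw [List.filter_eq_self]
    intro r hr
    rw [PySem.List.mem_pyRange_one] at hr
    simp only [hr1, hr2] at hr
    simp only [decide_eq_true_eq, abs_le]
    omega
  have hr : (PySem.List.pyRange (r2 + 1) (radius + 1) 1).filter (fun r => decide (|q + r| ≤ radius)) = [] := by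
    rw [List.filter_eq_nil_iff]
    intro r hr
    rw [PySem.List.mem_pyRange_one] at hr
    simp only [hr2] at hr
    simp only [decide_eq_true_eq, abs_le]
    omega
  rw [hl, hm, hr]
  simp

-- ===== VERDICT (by name: the statement is the Claim_ definition above) =====
theorem get_hex_coordinates_spec : Claim_equal_get_hex_coordinates := by
  intro radius _
  unfold Spec_get_hex_coordinates get_hex_coordinates get_hex_coordinates_alt
  rw [PySem.List.foldl_congr_mem
    (g := fun (acc : List (Int × Int)) q =>
      acc ++ ((PySem.List.pyRange (-radius) (radius + 1) 1).filter
        (fun r => decide (|q + r| ≤ radius))).map (fun r => (q, r)))]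
  · rw [PySem.List.foldl_append_eq_flatMap]
    rfl
  · intro acc q hq
    rw [PySem.List.mem_pyRange_one] at hq
    simp only
    rw [PySem.List.foldl_append_singleton_eq_map, pv_range_filter_eq radius q hq.1 hq.2]
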